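-- pv_equiv track=rewrite | github.com/BudraHH/My-Portfolio | test.py | getMaxNetVulnerability
-- ===== SOURCE A (Python) =====
-- def getMaxNetVulnerability(vulnerability):
--     # Handle the edge case where the matrix is empty
--     if not vulnerability or not vulnerability[0]:
--         return 0  # Return 0 for an empty matrix as a default "no vulnerability"
--
--     n = len(vulnerability)  # Number of rows
--     m = len(vulnerability[0])  # Number of columns
--
--     # Edge case: Single row, return the minimum value from that row
--     if n == 1:
--         return min(vulnerability[0])
--
--     # Edge case: Single column, return the maximum value from that column
--     if m == 1:
--         return max(row[0] for row in vulnerability)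
--
--     # Compute the overall maximum values in each column
--     overall_max = [max(vulnerability[row][col] for row in range(n)) for col in range(m)]
--
--     # Initialize the max_net_vulnerability to a very small number
--     max_net_vulnerability = float('-inf')
--
--     # Loop through each row, and treat it as the "removed row"
--     for i in range(n):
--         current_max_vulnerability = float('inf')
--         for col in range(m):
--             # Calculate the max for this column excluding the current row
--             max_excluding_row = max(vulnerability[row][col] for row in range(n) if row != i)
--             current_max_vulnerability = min(current_max_vulnerability, max_excluding_row)
--
--         # Update the maximum net vulnerability
--         max_net_vulnerability = max(max_net_vulnerability, current_max_vulnerability)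
--
--     return max_net_vulnerability
-- ===== SOURCE B (Python) =====
-- def getMaxNetVulnerability(vulnerability):
--     # One pass per column: keep (max, first argmax row, max excluding that row);
--     # then "column max excluding row i" is O(1) per (row, column).
--     if not vulnerability or not vulnerability[0]:
--         return 0
--     n = len(vulnerability)
--     m = len(vulnerability[0])
--     if n == 1:
--         return min(vulnerability[0])
--     best = []
--     for c in range(m):
--         mx = vulnerability[0][c]
--         mi = 0
--         sec = None
--         for r in range(1, n):
--             v = vulnerability[r][c]
--             if v > mx:
--                 sec = mx
--                 mx = v
--                 mi = r
--             else:
--                 sec = v if sec is None else max(sec, v)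
--         best.append((mx, mi, sec))
--     ans = None
--     for i in range(n):
--         cur = min(sec if mi == i else mx for (mx, mi, sec) in best)
--         ans = cur if ans is None else max(ans, cur)
--     return ans
-- ===== Notes on version B (the rewrite author's own statement) =====
-- stated objective: faster
-- what changed: Instead of recomputing each column's max excluding every row (an O(n) scan per row-column pair), B makes one pass per column recording (max, first argmax row, max over the remaining rows), so 'column max excluding row i' is read off in O(1).
import Mathlib
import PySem

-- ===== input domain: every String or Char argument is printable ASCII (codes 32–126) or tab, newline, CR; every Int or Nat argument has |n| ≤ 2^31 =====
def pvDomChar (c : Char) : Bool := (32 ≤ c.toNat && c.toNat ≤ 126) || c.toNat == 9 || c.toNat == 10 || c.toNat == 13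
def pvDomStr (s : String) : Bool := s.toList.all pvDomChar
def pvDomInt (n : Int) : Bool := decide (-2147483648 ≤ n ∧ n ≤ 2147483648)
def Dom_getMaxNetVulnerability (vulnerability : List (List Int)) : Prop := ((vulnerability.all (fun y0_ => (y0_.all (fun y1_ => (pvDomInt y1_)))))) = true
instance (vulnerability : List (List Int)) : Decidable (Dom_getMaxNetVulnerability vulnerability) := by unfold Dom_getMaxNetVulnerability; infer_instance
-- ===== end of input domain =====

-- B replaces A's O(n^2*m) "recompute each column max excluding every row" by a single
-- O(n*m) pass keeping per column (max, first argmax, max excluding that row).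

-- vulnerability[r][c]; inside Pre_ every access is in range, so the default 0 is never used
def pvGet (vul : List (List Int)) (r c : Nat) : Int := (vul.getD r []).getD c 0

-- ===== PORT A =====
def getMaxNetVulnerability (vulnerability : List (List Int)) : Int :=
  match vulnerability with
  | [] => 0
  | row0 :: _ =>
    if row0 = [] then 0 else
    let n := vulnerability.length
    let m := row0.length
    if n = 1 then (PySem.List.min? row0 (fun x => x)).getD 0
    else if m = 1 then
      (PySem.List.max? (vulnerability.map (fun row => row.getD 0 0)) (fun x => x)).getD 0
    else
      -- overall_max is computed by A and never used afterwards
      let _overall := (List.range m).map (fun c =>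
        (PySem.List.max? ((List.range n).map (fun r => pvGet vulnerability r c)) (fun x => x)).getD 0)
      let curMax := fun (i : Nat) =>
        (PySem.List.min? ((List.range m).map (fun c =>
          (PySem.List.max? (((List.range n).filter (fun r => r != i)).map
            (fun r => pvGet vulnerability r c)) (fun x => x)).getD 0)) (fun x => x)).getD 0
      (PySem.List.max? ((List.range n).map curMax) (fun x => x)).getD 0

-- ===== PORT B =====
-- per column c: (max, first row attaining it, max over the other rows (none while only one row seen))
def altColStats (vul : List (List Int)) (n c : Nat) : Int × Nat × Option Int :=
  (List.range' 1 (n - 1)).foldl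
    (fun s r =>
      let v := pvGet vul r c
      if v > s.1 then (v, r, some s.1)
      else (s.1, s.2.1, some (match s.2.2 with | none => v | some w => max w v)))
    (pvGet vul 0 c, 0, none)

def getMaxNetVulnerability_alt (vulnerability : List (List Int)) : Int :=
  match vulnerability with
  | [] => 0
  | row0 :: _ =>
    if row0 = [] then 0 else
    let n := vulnerability.length
    let m := row0.length
    if n = 1 then (PySem.List.min? row0 (fun x => x)).getD 0
    else
      let best := (List.range m).map (fun c => altColStats vulnerability n c)
      ((List.range n).foldl (fun ans i =>
        let cur := (PySem.List.min? (best.map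
          (fun s => if s.2.1 = i then s.2.2.getD s.1 else s.1)) (fun x => x)).getD 0
        match ans with
        | none => some cur
        | some a => some (max a cur)) (none : Option Int)).getD 0

-- ===== PRECONDITION & SPEC =====
-- Pre_ excludes exactly the inputs where Python A raises IndexError: with at least two rows,
-- some row shorter than the first row (A indexes every row at the first row's width).
def Pre_getMaxNetVulnerability (vulnerability : List (List Int)) : Prop :=
  ∀ row ∈ vulnerability, (vulnerability.headD []).length ≤ row.length
instance (vulnerability : List (List Int)) : Decidable (Pre_getMaxNetVulnerability vulnerability) := by
  unfold Pre_getMaxNetVulnerability; infer_instance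

def pvWitness_getMaxNetVulnerability : List (List Int) := [[1, 2], [3, 4]]

def Spec_getMaxNetVulnerability (vulnerability : List (List Int)) (out : Int) : Prop := out = getMaxNetVulnerability_alt vulnerability
instance (vulnerability : List (List Int)) (out : Int) : Decidable (Spec_getMaxNetVulnerability vulnerability out) := by unfold Spec_getMaxNetVulnerability; infer_instance

-- ===== CLAIM (what is proved, stated in full; the proofs are below) =====
def Claim_equal_getMaxNetVulnerability : Prop := ∀ (vulnerability : List (List Int)), Dom_getMaxNetVulnerability vulnerability → Pre_getMaxNetVulnerability vulnerability → Spec_getMaxNetVulnerability vulnerability (getMaxNetVulnerability vulnerability)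

-- ===== LEMMAS AND PROOFS =====

-- value characterisation of Python max()/min() on Int lists (identity key)
lemma pymax_eq_some_iff (l : List Int) (m : Int) :
    PySem.List.max? l (fun x => x) = some m ↔ m ∈ l ∧ ∀ y ∈ l, y ≤ m := by
  constructor
  · intro h
    exact ⟨PySem.List.max?_mem h, fun y hy => PySem.List.max?_isMax h y hy⟩
  · rintro ⟨hm, hb⟩
    have hne : l ≠ [] := by rintro rfl; exact absurd hm (by simp)
    rcases Option.ne_none_iff_exists'.1 (by
      intro h0; exact hne ((PySem.List.max?_eq_none_iff l (fun x => x)).1 h0)) with ⟨m', hm'⟩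
    have h1 := PySem.List.max?_mem hm'
    have h2 := PySem.List.max?_isMax hm' m hm
    have h3 := hb m' h1
    have : m' = m := le_antisymm h3 h2
    simpa [this] using hm'

lemma pymin_eq_some_iff (l : List Int) (m : Int) :
    PySem.List.min? l (fun x => x) = some m ↔ m ∈ l ∧ ∀ y ∈ l, m ≤ y := by
  constructor
  · intro h
    exact ⟨PySem.List.min?_mem h, fun y hy => PySem.List.min?_isMin h y hy⟩
  · rintro ⟨hm, hb⟩
    have hne : l ≠ [] := by rintro rfl; exact absurd hm (by simp)
    rcases Option.ne_none_iff_exists'.1 (by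
      intro h0; exact hne ((PySem.List.min?_eq_none_iff l (fun x => x)).1 h0)) with ⟨m', hm'⟩
    have h1 := PySem.List.min?_mem hm'
    have h2 := PySem.List.min?_isMin hm' m hm
    have h3 := hb m' h1
    have : m' = m := le_antisymm h2 h3
    simpa [this] using hm'

-- the invariant of B's per-column scan
def GoodStats (f : Nat → Int) (k : Nat) (s : Int × Nat × Option Int) : Prop :=
  s.2.1 < k ∧ f s.2.1 = s.1 ∧ (∀ r < k, f r ≤ s.1) ∧
  s.2.2 = PySem.List.max? (((List.range k).filter (fun r => r != s.2.1)).map f) (fun x => x)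

lemma filter_range_self (k : Nat) : (List.range k).filter (fun r => r != k) = List.range k :=
  List.filter_eq_self.mpr (fun a ha => by
    have := List.mem_range.1 ha; simp; omega)

lemma goodStep (f : Nat → Int) (k : Nat) (s : Int × Nat × Option Int) (hk : 1 ≤ k)
    (h : GoodStats f k s) :
    GoodStats f (k + 1)
      (if f k > s.1 then (f k, k, some s.1)
       else (s.1, s.2.1, some (match s.2.2 with | none => f k | some w => max w (f k)))) := by
  obtain ⟨hmi, hval, hbound, hsec⟩ := h
  by_cases hv : f k > s.1
  · rw [if_pos hv]
    refine ⟨Nat.lt_succ_self k, rfl, ?_, ?_⟩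
    · intro r hr
      rcases Nat.lt_succ_iff_lt_or_eq.1 hr with h' | h'
      · exact le_of_lt (lt_of_le_of_lt (hbound r h') hv)
      · subst h'; exact le_refl _
    · show some s.1 = _
      rw [List.range_succ, List.filter_append, filter_range_self]
      have : ([k] : List Nat).filter (fun r => r != k) = [] := by simp
      rw [this, List.append_nil]
      symm
      rw [pymax_eq_some_iff]
      refine ⟨List.mem_map.2 ⟨s.2.1, List.mem_range.2 hmi, hval⟩, ?_⟩
      intro y hy
      rcases List.mem_map.1 hy with ⟨r, hr, rfl⟩
      exact hbound r (List.mem_range.1 hr)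
  · rw [if_neg hv]
    push Not at hv
    refine ⟨Nat.lt_succ_of_lt hmi, hval, ?_, ?_⟩
    · intro r hr
      rcases Nat.lt_succ_iff_lt_or_eq.1 hr with h' | h'
      · exact hbound r h'
      · subst h'; exact hv
    · have hkmi : ([k] : List Nat).filter (fun r => r != s.2.1) = [k] := by
        simp; omega
      rcases hcase : s.2.2 with _ | w
      · rw [hcase] at hsec
        show some (f k)
          = PySem.List.max? (((List.range (k+1)).filter (fun r => r != s.2.1)).map f) (fun x => x)
        rw [List.range_succ, List.filter_append, hkmi, List.map_append]
        have hnil : ((List.range k).filter (fun r => r != s.2.1)).map f = [] :=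
          (PySem.List.max?_eq_none_iff _ _).1 hsec.symm
        rw [hnil]
        symm
        rw [pymax_eq_some_iff]
        simp
      · rw [hcase] at hsec
        have hw := (pymax_eq_some_iff _ _).1 hsec.symm
        show some (max w (f k))
          = PySem.List.max? (((List.range (k+1)).filter (fun r => r != s.2.1)).map f) (fun x => x)
        rw [List.range_succ, List.filter_append, hkmi, List.map_append]
        symm
        rw [pymax_eq_some_iff]
        constructor
        · rcases le_total w (f k) with hle | hle
          · rw [max_eq_right hle]
            exact List.mem_append.2 (Or.inr (by simp))
          · rw [max_eq_left hle]
            exact List.mem_append.2 (Or.inl hw.1)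
        · intro y hy
          rcases List.mem_append.1 hy with hy | hy
          · exact le_trans (hw.2 y hy) (le_max_left _ _)
          · simp at hy; subst hy; exact le_max_right _ _

lemma goodStats_fold (vul : List (List Int)) (c : Nat) (j : Nat) :
    ∀ (k : Nat) (s : Int × Nat × Option Int), 1 ≤ k →
      GoodStats (fun r => pvGet vul r c) k s →
      GoodStats (fun r => pvGet vul r c) (k + j)
        ((List.range' k j).foldl
          (fun s r =>
            let v := pvGet vul r c
            if v > s.1 then (v, r, some s.1)
            else (s.1, s.2.1, some (match s.2.2 with | none => v | some w => max w v))) s) := by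
  induction j with
  | zero => intro k s hk h; simpa using h
  | succ j ih =>
    intro k s hk h
    have hstep := goodStep (fun r => pvGet vul r c) k s hk h
    have := ih (k + 1) _ (by omega) hstep
    simpa [List.range', Nat.add_assoc, Nat.add_comm 1 j] using this

lemma altColStats_good (vul : List (List Int)) (n c : Nat) (hn : 2 ≤ n) :
    GoodStats (fun r => pvGet vul r c) n (altColStats vul n c) := by
  have hbase : GoodStats (fun r => pvGet vul r c) 1 (pvGet vul 0 c, 0, none) := by
    refine ⟨Nat.one_pos, rfl, ?_, ?_⟩
    · intro r hr; interval_cases r; exact le_refl _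
    · show (none : Option Int) = _
      have : (List.range 1).filter (fun r => r != 0) = [] := by decide
      rw [this]
      exact ((PySem.List.max?_eq_none_iff [] (fun x => x)).2 rfl).symm
  have := goodStats_fold vul c (n - 1) 1 _ (le_refl _) hbase
  have hn1 : 1 + (n - 1) = n := by omega
  rw [hn1] at this
  exact this

-- "column max excluding row i" read off from the stats
lemma excluding_eq (f : Nat → Int) (n : Nat) (s : Int × Nat × Option Int)
    (hn : 2 ≤ n) (hg : GoodStats f n s) (i : Nat) :
    (PySem.List.max? (((List.range n).filter (fun r => r != i)).map f) (fun x => x)).getD 0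
      = (if s.2.1 = i then s.2.2.getD s.1 else s.1) := by
  obtain ⟨hmi, hval, hbound, hsec⟩ := hg
  by_cases hcase : s.2.1 = i
  · rw [if_pos hcase, ← hcase, ← hsec]
    -- s.2.2 is some _: the filtered list is nonempty since n ≥ 2
    match hv : s.2.2 with
    | some w => rfl
    | none =>
      exfalso
      rw [hv] at hsec
      have hnil := (PySem.List.max?_eq_none_iff _ _).1 hsec.symm
      have : (if s.2.1 = 0 then 1 else 0) ∈ (List.range n).filter (fun r => r != s.2.1) := by
        rw [List.mem_filter, List.mem_range]
        by_cases h0 : s.2.1 = 0 <;> simp [h0] <;> omega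
      have : f (if s.2.1 = 0 then 1 else 0) ∈
          ((List.range n).filter (fun r => r != s.2.1)).map f := List.mem_map.2 ⟨_, this, rfl⟩
      rw [hnil] at this
      exact absurd this (by simp)
  · rw [if_neg hcase]
    have : PySem.List.max? (((List.range n).filter (fun r => r != i)).map f) (fun x => x)
        = some s.1 := by
      rw [pymax_eq_some_iff]
      refine ⟨List.mem_map.2 ⟨s.2.1, ?_, hval⟩, ?_⟩
      · rw [List.mem_filter, List.mem_range]
        exact ⟨hmi, by simpa using hcase⟩
      · intro y hy
        rcases List.mem_map.1 hy with ⟨r, hr, rfl⟩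
        exact hbound r (List.mem_range.1 (List.mem_filter.1 hr).1)
    rw [this]; rfl

-- B's outer accumulator loop is max() over the per-row values
lemma foldl_optmax_some (g : Nat → Int) (l : List Nat) :
    ∀ (a : Int),
      l.foldl (fun ans i =>
        let cur := g i
        match ans with
        | none => some cur
        | some b => some (max b cur)) (some a)
      = some ((l.map g).foldl max a) := by
  induction l with
  | nil => intro a; simp
  | cons x t ih => intro a; simpa using ih (max a (g x))

lemma foldl_optmax (g : Nat → Int) (l : List Nat) (hl : l ≠ []) :
    l.foldl (fun ans i =>
      let cur := g i
      match ans with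
      | none => some cur
      | some b => some (max b cur)) none
    = PySem.List.max? (l.map g) (fun x => x) := by
  match l with
  | [] => exact absurd rfl hl
  | x :: t =>
    rw [List.map_cons, PySem.List.max?_id_cons]
    simpa using foldl_optmax_some g t (g x)

-- vul.map (·[c]) = [vul[r][c] for r in range(len(vul))]
lemma map_getD_eq_range (vul : List (List Int)) (c : Nat) :
    vul.map (fun row => row.getD c 0)
      = (List.range vul.length).map (fun r => pvGet vul r c) := by
  induction vul with
  | nil => simp
  | cons h t ih =>
    rw [List.length_cons, List.range_succ_eq_map, List.map_cons, List.map_cons, List.map_map]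
    refine congrArg₂ _ rfl ?_
    rw [ih]
    exact (List.map_congr_left (fun r hr => by simp [pvGet])).symm

lemma min?_singleton (x : Int) : PySem.List.min? [x] (fun y => y) = some x :=
  (pymin_eq_some_iff _ _).2 ⟨by simp, by simp⟩

lemma sec_getD_le (f : Nat → Int) (n : Nat) (s : Int × Nat × Option Int)
    (hg : GoodStats f n s) : s.2.2.getD s.1 ≤ s.1 := by
  obtain ⟨hmi, hval, hbound, hsec⟩ := hg
  rcases hcase : s.2.2 with _ | w
  · simp
  · rw [hcase] at hsec
    have hw := (pymax_eq_some_iff _ _).1 hsec.symm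
    rcases List.mem_map.1 hw.1 with ⟨r, hr, rfl⟩
    simpa using hbound r (List.mem_range.1 (List.mem_filter.1 hr).1)

-- A's "max over i of (min over cols of column-max excluding row i)" equals the same
-- expression read off B's per-column stats, pointwise via excluding_eq
lemma gen_eq (vul : List (List Int)) (n m : Nat) (hn : 2 ≤ n) :
    ((List.range n).map (fun i =>
      (PySem.List.min? ((List.range m).map (fun c =>
        (PySem.List.max? (((List.range n).filter (fun r => r != i)).map
          (fun r => pvGet vul r c)) (fun x => x)).getD 0)) (fun x => x)).getD 0))
    = ((List.range n).map (fun i =>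
      (PySem.List.min? (((List.range m).map (fun c => altColStats vul n c)).map
        (fun s => if s.2.1 = i then s.2.2.getD s.1 else s.1)) (fun x => x)).getD 0)) := by
  refine List.map_congr_left (fun i hi => ?_)
  rw [List.map_map]
  refine congrArg₂ _ (congrArg₂ _ (List.map_congr_left (fun c _ => ?_)) rfl) rfl
  exact excluding_eq (fun r => pvGet vul r c) n (altColStats vul n c) hn
    (altColStats_good vul n c hn) i

-- the single-column special case of A agrees with B's general path at m = 1
lemma m_one_eq (vul : List (List Int)) (hn : 2 ≤ vul.length) :
    (PySem.List.max? (vul.map (fun row => row.getD 0 0)) (fun x => x)).getD 0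
    = (PySem.List.max? ((List.range vul.length).map (fun i =>
        (PySem.List.min? (((List.range 1).map (fun c => altColStats vul vul.length c)).map
          (fun s => if s.2.1 = i then s.2.2.getD s.1 else s.1)) (fun x => x)).getD 0))
        (fun x => x)).getD 0 := by
  set n := vul.length with hnn
  have hg := altColStats_good vul n 0 hn
  set s := altColStats vul n 0 with hs
  obtain ⟨hmi, hval, hbound, -⟩ := hg
  have hL : PySem.List.max? (vul.map (fun row => row.getD 0 0)) (fun x => x) = some s.1 := by
    rw [map_getD_eq_range, ← hnn, pymax_eq_some_iff]
    refine ⟨List.mem_map.2 ⟨s.2.1, List.mem_range.2 hmi, hval⟩, ?_⟩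
    intro y hy
    rcases List.mem_map.1 hy with ⟨r, hr, rfl⟩
    exact hbound r (List.mem_range.1 hr)
  have hinner : ∀ i : Nat,
      (PySem.List.min? (((List.range 1).map (fun c => altColStats vul n c)).map
        (fun s => if s.2.1 = i then s.2.2.getD s.1 else s.1)) (fun x => x)).getD 0
      = (if s.2.1 = i then s.2.2.getD s.1 else s.1) := by
    intro i
    rw [List.range_one, List.map_cons, List.map_nil, List.map_cons, List.map_nil, ← hs,
      min?_singleton]
    rfl
  have hR : PySem.List.max? ((List.range n).map (fun i =>
      (PySem.List.min? (((List.range 1).map (fun c => altColStats vul n c)).map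
        (fun s => if s.2.1 = i then s.2.2.getD s.1 else s.1)) (fun x => x)).getD 0))
      (fun x => x) = some s.1 := by
    rw [pymax_eq_some_iff]
    constructor
    · refine List.mem_map.2 ⟨if s.2.1 = 0 then 1 else 0, ?_, ?_⟩
      · rw [List.mem_range]; by_cases h0 : s.2.1 = 0 <;> simp [h0] <;> omega
      · rw [hinner]
        by_cases h0 : s.2.1 = 0 <;> simp [h0]
    · intro y hy
      rcases List.mem_map.1 hy with ⟨i, hi, rfl⟩
      rw [hinner]
      by_cases h0 : s.2.1 = i
      · rw [if_pos h0]
        exact sec_getD_le (fun r => pvGet vul r 0) n s ⟨hmi, hval, hbound, (altColStats_good vul n 0 hn).2.2.2⟩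
      · rw [if_neg h0]
  rw [hL, hR]

-- ===== VERDICT (by name: the statement is the Claim_ definition above) =====
theorem getMaxNetVulnerability_spec : Claim_equal_getMaxNetVulnerability := by
  intro vul _ _
  unfold Spec_getMaxNetVulnerability
  match vul with
  | [] => rfl
  | [row0] => simp [getMaxNetVulnerability, getMaxNetVulnerability_alt]
  | row0 :: r1 :: rest =>
    simp only [getMaxNetVulnerability, getMaxNetVulnerability_alt]
    by_cases h0 : row0 = []
    · simp [h0]
    · rw [if_neg h0, if_neg h0]
      have hlen : (row0 :: r1 :: rest).length = rest.length + 2 := by simp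
      have hn1 : ¬ (row0 :: r1 :: rest).length = 1 := by rw [hlen]; omega
      rw [if_neg hn1, if_neg hn1]
      have hn : 2 ≤ (row0 :: r1 :: rest).length := by rw [hlen]; omega
      rw [foldl_optmax _ _ (by
        have : (0 : Nat) ∈ List.range (row0 :: r1 :: rest).length := by
          rw [List.mem_range]; omega
        intro hnil; rw [hnil] at this; exact absurd this (by simp))]
      by_cases hm : row0.length = 1
      · rw [if_pos hm, hm]
        exact m_one_eq (row0 :: r1 :: rest) hn
      · rw [if_neg hm]
        exact congrArg₂ (fun l k => (PySem.List.max? l k).getD (0:Int))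
          (gen_eq (row0 :: r1 :: rest) _ _ hn) rfl
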